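-- pv_equiv track=rewrite | github.com/Calysto/metakernel | metakernel/_metakernel.py | _split_magics_code
-- ===== SOURCE A (Python) =====
-- from typing import TYPE_CHECKING, Any
--
-- def _split_magics_code(code: str, prefixes: dict[str, Any]) -> tuple[str, str]:
--     lines = code.split("\n")
--     ret_magics = []
--     ret_code = []
--     index = 0
--     shell = prefixes["shell"]
--     magic = prefixes["magic"]
--     while index < len(lines) and lines[index].startswith((shell, magic)):
--         ret_magics.append(lines[index])
--         index += 1
--     while index < len(lines):
--         ret_code.append(lines[index])
--         index += 1
--     ret_magics_str = "\n".join(ret_magics)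
--     if ret_magics_str:
--         ret_magics_str += "\n"
--     ret_code_str = "\n".join(ret_code)
--     if ret_code_str:
--         ret_code_str += "\n"
--     return (ret_magics_str, ret_code_str)
-- ===== SOURCE B (Python) =====
-- def _split_magics_code(code, prefixes):
--     shell = prefixes["shell"]
--     magic = prefixes["magic"]
--
--     def go(lines):
--         if lines and lines[0].startswith((shell, magic)):
--             magics, rest = go(lines[1:])
--             return [lines[0]] + magics, rest
--         return [], lines
--
--     magics, rest = go(code.split("\n"))
--     m = "\n".join(magics)
--     c = "\n".join(rest)
--     return (m + "\n" if m else m, c + "\n" if c else c)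
-- ===== Notes on version B (the rewrite author's own statement) =====
-- stated objective: simpler
-- what changed: Replaced A's two index-driven while loops with one structural recursion that splits the line list into (magic lines, remaining lines) in a single descent; no index variable and no second copy loop.
-- outside the precondition, e.g. on _split_magics_code('x=1', {'magic': '%'}): A raises KeyError, B raises KeyError
import Mathlib
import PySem

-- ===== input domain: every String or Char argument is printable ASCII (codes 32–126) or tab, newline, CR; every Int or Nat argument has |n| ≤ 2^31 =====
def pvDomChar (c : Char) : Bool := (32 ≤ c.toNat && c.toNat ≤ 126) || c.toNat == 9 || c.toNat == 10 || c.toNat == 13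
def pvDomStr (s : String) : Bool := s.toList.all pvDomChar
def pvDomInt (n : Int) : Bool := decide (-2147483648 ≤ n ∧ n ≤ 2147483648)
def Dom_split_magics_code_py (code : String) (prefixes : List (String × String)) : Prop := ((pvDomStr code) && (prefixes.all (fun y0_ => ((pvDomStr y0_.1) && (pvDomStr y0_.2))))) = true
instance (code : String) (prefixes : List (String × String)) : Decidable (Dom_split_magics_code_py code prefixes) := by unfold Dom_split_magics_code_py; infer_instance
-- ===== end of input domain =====

-- B replaces A's two index-driven while loops with one structural recursion splitting the line list; objective: simpler.
-- A raises KeyError when prefixes lacks "shell" or "magic"; Pre_ excludes exactly those inputs.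


-- ===== PORT A =====
-- first while loop: collect magic lines while the indexed line starts with shell or magic
def pvALoop1 (lines : List String) (shell magic : String) (acc : List String) (index : Nat) : List String × Nat :=
  if h : index < lines.length ∧ (PySem.Str.startswith (lines.getD index "") shell || PySem.Str.startswith (lines.getD index "") magic) = true then
    pvALoop1 lines shell magic (acc ++ [lines.getD index ""]) (index + 1)
  else (acc, index)
termination_by lines.length - index
decreasing_by omega

-- second while loop: copy the remaining lines
def pvALoop2 (lines : List String) (acc : List String) (index : Nat) : List String :=
  if index < lines.length then pvALoop2 lines (acc ++ [lines.getD index ""]) (index + 1) else acc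
termination_by lines.length - index
decreasing_by omega

def split_magics_code_py (code : String) (prefixes : List (String × String)) : String × String :=
  let lines := (PySem.Str.split? code "\n").getD []
  match (PySem.Dict.mk prefixes).get? "shell", (PySem.Dict.mk prefixes).get? "magic" with
  | some shell, some magic =>
    let p := pvALoop1 lines shell magic [] 0
    let retCode := pvALoop2 lines [] p.2
    let m := PySem.Str.join "\n" p.1
    let m := if m = "" then m else m ++ "\n"
    let c := PySem.Str.join "\n" retCode
    let c := if c = "" then c else c ++ "\n"
    (m, c)
  | _, _ => ("", "")   -- unreachable under Pre_: Python raises KeyError here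

-- ===== PORT B =====
-- one structural recursion: (leading magic lines, remaining lines)
def pvBGo (shell magic : String) : List String → List String × List String
  | [] => ([], [])
  | l :: rest =>
    if (PySem.Str.startswith l shell || PySem.Str.startswith l magic) = true then
      let p := pvBGo shell magic rest
      (l :: p.1, p.2)
    else ([], l :: rest)

def split_magics_code_py_alt (code : String) (prefixes : List (String × String)) : String × String :=
  match (PySem.Dict.mk prefixes).get? "shell" with
  | none => ("", "")   -- unreachable under Pre_: Python raises KeyError here
  | some shell =>
    match (PySem.Dict.mk prefixes).get? "magic" with
    | none => ("", "")   -- unreachable under Pre_: Python raises KeyError here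
    | some magic =>
      let p := pvBGo shell magic ((PySem.Str.split? code "\n").getD [])
      let m := PySem.Str.join "\n" p.1
      let c := PySem.Str.join "\n" p.2
      (if m = "" then m else m ++ "\n", if c = "" then c else c ++ "\n")

-- ===== PRECONDITION & SPEC =====
-- Pre_ excludes exactly the inputs where A (and B) raise KeyError: prefixes missing "shell" or "magic"
def Pre_split_magics_code_py (code : String) (prefixes : List (String × String)) : Prop :=
  ((PySem.Dict.mk prefixes).get? "shell").isSome ∧ ((PySem.Dict.mk prefixes).get? "magic").isSome
instance (code : String) (prefixes : List (String × String)) : Decidable (Pre_split_magics_code_py code prefixes) := by unfold Pre_split_magics_code_py; infer_instance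

def pvWitness_split_magics_code_py : String × (List (String × String)) :=
  ("%mag\nx = 1", [("shell", "!"), ("magic", "%")])

def Spec_split_magics_code_py (code : String) (prefixes : List (String × String)) (out : String × String) : Prop := out = split_magics_code_py_alt code prefixes
instance (code : String) (prefixes : List (String × String)) (out : String × String) : Decidable (Spec_split_magics_code_py code prefixes out) := by unfold Spec_split_magics_code_py; infer_instance

-- ===== CLAIM (what is proved, stated in full; the proofs are below) =====
def Claim_equal_split_magics_code_py : Prop := ∀ (code : String) (prefixes : List (String × String)), Dom_split_magics_code_py code prefixes → Pre_split_magics_code_py code prefixes → Spec_split_magics_code_py code prefixes (split_magics_code_py code prefixes)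

-- ===== LEMMAS AND PROOFS =====

-- B's recursion splits the list: its two parts concatenate back to the input
theorem pvBGo_append (shell magic : String) (l : List String) :
    (pvBGo shell magic l).1 ++ (pvBGo shell magic l).2 = l := by
  induction l with
  | nil => simp [pvBGo]
  | cons x rest ih =>
    simp only [pvBGo]
    split <;> simp_all

-- A's first loop computes B's first component (and the boundary index)
theorem pvALoop1_eq (lines : List String) (shell magic : String) :
    ∀ (n : Nat) (acc : List String) (index : Nat), lines.length - index ≤ n →
      pvALoop1 lines shell magic acc index =
        (acc ++ (pvBGo shell magic (lines.drop index)).1,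
         index + (pvBGo shell magic (lines.drop index)).1.length) := by
  intro n
  induction n with
  | zero =>
    intro acc index hn
    have hd : lines.drop index = [] := List.drop_eq_nil_of_le (by omega)
    rw [pvALoop1, dif_neg (fun hc => by omega)]
    simp [hd, pvBGo]
  | succ n ih =>
    intro acc index hn
    by_cases hlt : index < lines.length
    · have hg : lines.getD index "" = lines[index] := by
        simp [List.getD_eq_getElem?_getD, List.getElem?_eq_getElem hlt]
      rw [List.drop_eq_getElem_cons hlt]
      by_cases hp : (PySem.Str.startswith lines[index] shell || PySem.Str.startswith lines[index] magic) = true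
      · rw [pvALoop1, dif_pos ⟨hlt, hg ▸ hp⟩, ih _ (index + 1) (by omega)]
        simp only [pvBGo, if_pos hp, Prod.mk.injEq]
        refine ⟨by simp [List.getElem?_eq_getElem hlt], by simp; omega⟩
      · rw [pvALoop1, dif_neg (fun hc => hp (hg ▸ hc.2))]
        simp only [pvBGo, if_neg hp]
        simp
    · have hd : lines.drop index = [] := List.drop_eq_nil_of_le (by omega)
      rw [pvALoop1, dif_neg (fun hc => hlt hc.1)]
      simp [hd, pvBGo]

-- A's second loop copies the suffix
theorem pvALoop2_eq (lines : List String) :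
    ∀ (n : Nat) (acc : List String) (index : Nat), lines.length - index ≤ n →
      pvALoop2 lines acc index = acc ++ lines.drop index := by
  intro n
  induction n with
  | zero =>
    intro acc index hn
    have hd : lines.drop index = [] := List.drop_eq_nil_of_le (by omega)
    rw [pvALoop2, if_neg (by omega)]
    simp [hd]
  | succ n ih =>
    intro acc index hn
    by_cases hlt : index < lines.length
    · have hg : lines.getD index "" = lines[index] := by
        simp [List.getD_eq_getElem?_getD, List.getElem?_eq_getElem hlt]
      rw [pvALoop2, if_pos hlt, ih _ (index + 1) (by omega), hg,
          List.drop_eq_getElem_cons hlt]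
      simp
    · have hd : lines.drop index = [] := List.drop_eq_nil_of_le (by omega)
      rw [pvALoop2, if_neg hlt]
      simp [hd]

-- the suffix A's second loop copies is exactly B's second component
theorem pvBGo_drop (shell magic : String) (l : List String) :
    l.drop (pvBGo shell magic l).1.length = (pvBGo shell magic l).2 := by
  rcases hp : pvBGo shell magic l with ⟨m, r⟩
  have h := pvBGo_append shell magic l
  rw [hp] at h
  dsimp only at h ⊢
  subst h
  simp

-- ===== VERDICT (by name: the statement is the Claim_ definition above) =====
theorem split_magics_code_py_spec : Claim_equal_split_magics_code_py := by
  intro code prefixes _ hpre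
  obtain ⟨hs, hm⟩ := hpre
  unfold Spec_split_magics_code_py split_magics_code_py split_magics_code_py_alt
  obtain ⟨shell, hsh⟩ := Option.isSome_iff_exists.mp hs
  obtain ⟨magic, hmg⟩ := Option.isSome_iff_exists.mp hm
  rw [hsh, hmg]
  dsimp only
  rw [pvALoop1_eq _ _ _ ((PySem.Str.split? code "\n").getD []).length [] 0 (by omega)]
  rw [pvALoop2_eq _ (((PySem.Str.split? code "\n").getD []).length) [] _ (by omega)]
  simp [pvBGo_drop]
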